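-- pv_equiv track=rewrite | github.com/np2334/strypes-2022-internship | Exam/Exercise_01.py | find_books
-- ===== SOURCE A (Python) =====
-- def to_lower(character):
--     return chr(ord(character) + 32) if ord(character) in range (65, 91) else character
--
-- def find_books(list_of_books, book_partial_title):
--     found_books = []
--     for book in list_of_books:
--         for i in range(0, len(book)):
--             book_character = book[i]
--             if to_lower(book_character) == to_lower(book_partial_title[0]):
--                 isFullMatch = True
--                 for j in range(1, len(book_partial_title)):
--                     if i + j >= len(book):
--                         isFullMatch = False
--                         break
--
--                     currentCharacter = to_lower(book_partial_title[j])
--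
--                     if currentCharacter != to_lower(book[i + j]):
--                         isFullMatch = False
--
--                 if isFullMatch:
--                     found_books.append(book)
--                     # ако търсената дума се повтаря ще я добавя няколко пъти, затова break-вам
--                     break
--     return found_books
-- ===== SOURCE B (Python) =====
-- def find_books(list_of_books, book_partial_title):
--     needle = book_partial_title.lower()
--     return [book for book in list_of_books if needle in book.lower()]
-- ===== Notes on version B (the rewrite author's own statement) =====
-- stated objective: faster
-- what changed: Replaces the hand-written per-character nested scan (with a char-by-char lowercase helper) by lowering both strings once and using Python's native substring test in a comprehension.
-- outside the precondition, e.g. on find_books([''], ''): A returns [], B returns ['']; on find_books(['Moby Dick'], ''): A raises IndexError, B returns ['Moby Dick']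
import Mathlib
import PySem

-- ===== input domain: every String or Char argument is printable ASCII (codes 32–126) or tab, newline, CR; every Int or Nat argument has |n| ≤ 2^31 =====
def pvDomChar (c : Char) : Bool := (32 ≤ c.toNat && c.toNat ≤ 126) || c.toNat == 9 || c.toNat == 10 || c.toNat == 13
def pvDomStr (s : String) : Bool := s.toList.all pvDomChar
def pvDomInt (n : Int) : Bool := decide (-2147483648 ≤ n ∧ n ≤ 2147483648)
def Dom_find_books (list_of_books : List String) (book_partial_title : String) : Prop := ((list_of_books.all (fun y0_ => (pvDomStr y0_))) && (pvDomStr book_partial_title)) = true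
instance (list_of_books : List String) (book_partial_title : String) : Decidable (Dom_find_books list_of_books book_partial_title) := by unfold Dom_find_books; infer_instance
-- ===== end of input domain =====

-- B lowers both strings once and uses the native substring test instead of A's
-- hand-written per-character nested scan; same return value on every nonempty pattern.


-- ===== PORT A =====
-- to_lower(character): chr(ord(c)+32) if ord(c) in range(65, 91) else c
def to_lower (c : Char) : Char :=
  if 65 ≤ c.toNat ∧ c.toNat < 91 then Char.ofNat (c.toNat + 32) else c

-- inner 'for j in range(1, len(book_partial_title))' loop carrying the isFullMatch flag;
-- the bounds break returns False immediately, a character mismatch only clears the flag.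
-- Indexing via getD is exact here: under Pre_ the pattern is nonempty, j < len(pattern),
-- and i + j is bounds-checked before book[i + j] is read (Python raises nowhere here).
def matchLoop (book pat : List Char) (i j : Nat) (flag : Bool) : Bool :=
  if _h : j < pat.length then
    if book.length ≤ i + j then false
    else matchLoop book pat i (j + 1)
      (if to_lower (pat.getD j ' ') ≠ to_lower (book.getD (i + j) ' ') then false else flag)
  else flag
termination_by pat.length - j

-- outer 'for i in range(0, len(book))' loop; 'break' after a successful append
def scanBook (book pat : List Char) (i : Nat) : Bool :=
  if _h : i < book.length then
    if to_lower (book.getD i ' ') = to_lower (pat.getD 0 ' ') then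
      if matchLoop book pat i 1 true then true else scanBook book pat (i + 1)
    else scanBook book pat (i + 1)
  else false
termination_by book.length - i

def find_books (list_of_books : List String) (book_partial_title : String) : List String :=
  list_of_books.foldl
    (fun found_books book =>
      if scanBook book.toList book_partial_title.toList 0 then found_books ++ [book]
      else found_books) []

-- ===== PORT B =====
def find_books_alt (list_of_books : List String) (book_partial_title : String) : List String :=
  let needle := PySem.Str.lower book_partial_title
  list_of_books.filter (fun book => PySem.Str.isIn needle (PySem.Str.lower book))

-- ===== PRECONDITION & SPEC =====
-- Pre_ excludes the empty search pattern: there A raises IndexError (book_partial_title[0])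
-- as soon as any book is nonempty, and when every book is empty A's accidental value is []
-- while B naturally finds the empty pattern in every title.
def Pre_find_books (list_of_books : List String) (book_partial_title : String) : Prop :=
  book_partial_title ≠ ""
instance (list_of_books : List String) (book_partial_title : String) : Decidable (Pre_find_books list_of_books book_partial_title) := by unfold Pre_find_books; infer_instance

def pvWitness_find_books : List String × String := (["Harry Potter", "Moby Dick", ""], "POTT")

def Spec_find_books (list_of_books : List String) (book_partial_title : String) (out : List String) : Prop := out = find_books_alt list_of_books book_partial_title
instance (list_of_books : List String) (book_partial_title : String) (out : List String) : Decidable (Spec_find_books list_of_books book_partial_title out) := by unfold Spec_find_books; infer_instance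

-- ===== CLAIM (what is proved, stated in full; the proofs are below) =====
def Claim_equal_find_books : Prop := ∀ (list_of_books : List String) (book_partial_title : String), Dom_find_books list_of_books book_partial_title → Pre_find_books list_of_books book_partial_title → Spec_find_books list_of_books book_partial_title (find_books list_of_books book_partial_title)

-- ===== LEMMAS AND PROOFS =====

theorem to_lower_eq_lowerChar (c : Char) : to_lower c = PySem.Chars.lowerChar c := by
  unfold to_lower PySem.Chars.lowerChar PySem.Chars.isupper
  have hA : ('A' ≤ c) ↔ (65 ≤ c.toNat) := by
    rw [Char.le_def, UInt32.le_iff_toNat_le]; exact Iff.rfl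
  have hZ : (c ≤ 'Z') ↔ (c.toNat ≤ 90) := by
    rw [Char.le_def, UInt32.le_iff_toNat_le]; exact Iff.rfl
  by_cases h : 65 ≤ c.toNat ∧ c.toNat < 91
  · rw [if_pos h, if_pos]
    rw [Bool.and_eq_true, decide_eq_true_eq, decide_eq_true_eq, hA, hZ]
    omega
  · rw [if_neg h, if_neg]
    rw [Bool.and_eq_true, decide_eq_true_eq, decide_eq_true_eq, hA, hZ]
    omega

theorem matchLoop_eq (book pat : List Char) (i j : Nat) (flag : Bool) :
    matchLoop book pat i j flag =
      (flag && decide (∀ k, j ≤ k → k < pat.length →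
        i + k < book.length ∧
        to_lower (pat.getD k ' ') = to_lower (book.getD (i + k) ' '))) := by
  by_cases h : j < pat.length
  · rw [matchLoop, dif_pos h]
    by_cases hb : book.length ≤ i + j
    · rw [if_pos hb]
      have : ¬ (∀ k, j ≤ k → k < pat.length →
          i + k < book.length ∧
          to_lower (pat.getD k ' ') = to_lower (book.getD (i + k) ' ')) := by
        intro hall
        exact absurd (hall j le_rfl h).1 (by omega)
      rw [decide_eq_false this, Bool.and_false]
    · rw [if_neg hb]
      rw [matchLoop_eq book pat i (j + 1)]
      by_cases hc : to_lower (pat.getD j ' ') = to_lower (book.getD (i + j) ' ')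
      · rw [if_neg (by simpa using hc)]
        congr 1
        apply decide_eq_decide.mpr
        constructor
        · intro hall k hk hk'
          rcases Nat.eq_or_lt_of_le hk with rfl | hlt
          · exact ⟨by omega, hc⟩
          · exact hall k hlt hk'
        · intro hall k hk hk'
          exact hall k (by omega) hk'
      · rw [if_pos (by simpa using hc)]
        simp only [Bool.false_and]
        symm
        rw [Bool.and_eq_false_iff]
        right
        simp only [decide_eq_false_iff_not]
        intro hall
        exact hc (hall j le_rfl h).2
  · rw [matchLoop, dif_neg h]
    have : ∀ k, j ≤ k → k < pat.length →
        i + k < book.length ∧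
        to_lower (pat.getD k ' ') = to_lower (book.getD (i + k) ' ') := by
      intro k hk hk'; omega
    rw [decide_eq_true this, Bool.and_true]
termination_by pat.length - j

-- full-match-at-i ⇔ the lowered pattern is a prefix of (lowered book).drop i
theorem prefix_iff_chars (book pat : List Char) (i : Nat) (hp : pat ≠ []) (hi : i < book.length) :
    (to_lower (book.getD i ' ') = to_lower (pat.getD 0 ' ') ∧
      ∀ k, 1 ≤ k → k < pat.length →
        i + k < book.length ∧
        to_lower (pat.getD k ' ') = to_lower (book.getD (i + k) ' '))
    ↔ pat.map to_lower <+: (book.map to_lower).drop i := by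
  have hplen : 0 < pat.length := List.length_pos_iff.mpr hp
  constructor
  · rintro ⟨h0, hrest⟩
    rw [List.prefix_iff_getElem?]
    intro k hk
    simp only [List.length_map] at hk
    have hkb : i + k < book.length := by
      rcases Nat.eq_zero_or_pos k with rfl | hkpos
      · omega
      · exact (hrest k hkpos hk).1
    have hchar : to_lower (pat.getD k ' ') = to_lower (book.getD (i + k) ' ') := by
      rcases Nat.eq_zero_or_pos k with rfl | hkpos
      · simpa using h0.symm
      · exact (hrest k hkpos hk).2
    rw [List.getElem?_drop, List.getElem?_eq_getElem (by simpa using hkb)]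
    simp only [List.getElem_map]
    rw [List.getD_eq_getElem pat ' ' hk, List.getD_eq_getElem book ' ' hkb] at hchar
    exact congrArg some hchar.symm
  · intro hpre
    have hget : ∀ k, k < pat.length → i + k < book.length ∧
        to_lower (pat.getD k ' ') = to_lower (book.getD (i + k) ' ') := by
      intro k hk
      have h1 := (List.prefix_iff_getElem?.mp hpre) k (by simpa using hk)
      rw [List.getElem?_drop] at h1
      obtain ⟨hlt, heq⟩ := List.getElem?_eq_some_iff.mp h1
      simp only [List.length_map] at hlt
      simp only [List.getElem_map] at heq
      refine ⟨hlt, ?_⟩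
      rw [List.getD_eq_getElem pat ' ' hk, List.getD_eq_getElem book ' ' hlt]
      exact heq.symm
    refine ⟨?_, fun k _ hk2 => hget k hk2⟩
    have := (hget 0 hplen).2
    simpa using this.symm

theorem scanBook_iff (book pat : List Char) (i : Nat) (hp : pat ≠ []) :
    scanBook book pat i = true ↔
      ∃ i', i ≤ i' ∧ i' < book.length ∧ pat.map to_lower <+: (book.map to_lower).drop i' := by
  by_cases h : i < book.length
  · rw [scanBook, dif_pos h]
    have hmatch : (to_lower (book.getD i ' ') = to_lower (pat.getD 0 ' ') ∧ matchLoop book pat i 1 true = true)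
        ↔ pat.map to_lower <+: (book.map to_lower).drop i := by
      rw [matchLoop_eq]
      simp only [Bool.true_and, decide_eq_true_eq]
      exact prefix_iff_chars book pat i hp h
    by_cases h0 : to_lower (book.getD i ' ') = to_lower (pat.getD 0 ' ')
    · rw [if_pos h0]
      by_cases hm : matchLoop book pat i 1 true = true
      · rw [if_pos hm]
        constructor
        · intro _; exact ⟨i, le_rfl, h, hmatch.mp ⟨h0, hm⟩⟩
        · intro _; rfl
      · rw [if_neg hm, scanBook_iff book pat (i + 1) hp]
        constructor
        · rintro ⟨i', h1, h2, h3⟩; exact ⟨i', by omega, h2, h3⟩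
        · rintro ⟨i', h1, h2, h3⟩
          rcases Nat.eq_or_lt_of_le h1 with rfl | hlt
          · exact absurd (hmatch.mpr h3).2 hm
          · exact ⟨i', hlt, h2, h3⟩
    · rw [if_neg h0, scanBook_iff book pat (i + 1) hp]
      constructor
      · rintro ⟨i', h1, h2, h3⟩; exact ⟨i', by omega, h2, h3⟩
      · rintro ⟨i', h1, h2, h3⟩
        rcases Nat.eq_or_lt_of_le h1 with rfl | hlt
        · exact absurd (hmatch.mpr h3).1 h0
        · exact ⟨i', hlt, h2, h3⟩
  · rw [scanBook, dif_neg h]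
    constructor
    · intro habs; exact absurd habs (by simp)
    · rintro ⟨i', h1, h2, _⟩; omega
termination_by book.length - i

theorem scanBook_eq_isIn (book pat : List Char) (hp : pat ≠ []) :
    scanBook book pat 0 = PySem.Chars.isIn (PySem.Chars.lower pat) (PySem.Chars.lower book) := by
  have hl1 : PySem.Chars.lower pat = pat.map to_lower := by
    unfold PySem.Chars.lower
    exact List.map_congr_left (fun a _ => (to_lower_eq_lowerChar a).symm)
  have hl2 : PySem.Chars.lower book = book.map to_lower := by
    unfold PySem.Chars.lower
    exact List.map_congr_left (fun a _ => (to_lower_eq_lowerChar a).symm)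
  rw [hl1, hl2, Bool.eq_iff_iff, scanBook_iff book pat 0 hp,
      ← PySem.Chars.exists_prefix_drop_iff_isIn]
  constructor
  · rintro ⟨i', _, _, hpre⟩; exact ⟨i', hpre⟩
  · rintro ⟨j, hj⟩
    refine ⟨j, Nat.zero_le j, ?_, hj⟩
    by_contra hge
    have hnil : (book.map to_lower).drop j = [] :=
      List.drop_eq_nil_of_le (by simp; omega)
    rw [hnil] at hj
    have hnil2 : pat.map to_lower = [] := List.prefix_nil.mp hj
    have : pat = [] := by simpa using hnil2
    exact hp this

-- ===== VERDICT (by name: the statement is the Claim_ definition above) =====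
theorem find_books_spec : Claim_equal_find_books := by
  intro lob pat _ hpre
  unfold Spec_find_books find_books find_books_alt
  rw [PySem.List.foldl_append_if_eq_filter]
  simp only [List.nil_append]
  apply List.filter_congr
  intro book _
  have hp : pat.toList ≠ [] := fun h => hpre (String.toList_eq_nil_iff.mp h)
  rw [scanBook_eq_isIn book.toList pat.toList hp]
  rw [PySem.Str.isIn_eq]
  simp [PySem.Str.toList_lower]
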